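-- pv_equiv track=rewrite | github.com/dr-tcl/series_maker | main.py | series_maker
-- ===== SOURCE A (Python) =====
-- def series_maker(n):
--     """
--     time complexity this function is O(n)
--     """
--     if n <= 0:
--         return 0
--     elif n == 1:
--         return 1
--
--     prev_prev = 0
--     prev = 1
--     value = 0
--
--     for i in range(2, n + 1):
--         value = (prev % 10) + (prev // 10) + (prev_prev % 10) + (prev_prev // 10)
--         prev, prev_prev = value, prev
--
--     return value
-- ===== SOURCE B (Python) =====
-- _CYCLE = [2, 3, 5, 8, 13, 12, 7, 10, 8, 9, 17, 17,
--           16, 15, 13, 10, 5, 6, 11, 8, 10, 9, 10, 10]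
--
-- def series_maker(n):
--     # The recurrence's (prev_prev, prev) state space is finite, so the
--     # sequence is eventually periodic: from n = 3 on it repeats with
--     # period 24, so the nth term is a table lookup -- O(1).
--     if n <= 0:
--         return 0
--     if n <= 2:
--         return 1
--     return _CYCLE[(n - 3) % 24]
-- ===== Notes on version B (the rewrite author's own statement) =====
-- stated objective: faster
-- what changed: Replaced the O(n) digit-sum recurrence loop by an O(1) lookup into the precomputed 24-term cycle that the sequence enters at n=3 (the finite (prev_prev, prev) state space makes it periodic).
import Mathlib
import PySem

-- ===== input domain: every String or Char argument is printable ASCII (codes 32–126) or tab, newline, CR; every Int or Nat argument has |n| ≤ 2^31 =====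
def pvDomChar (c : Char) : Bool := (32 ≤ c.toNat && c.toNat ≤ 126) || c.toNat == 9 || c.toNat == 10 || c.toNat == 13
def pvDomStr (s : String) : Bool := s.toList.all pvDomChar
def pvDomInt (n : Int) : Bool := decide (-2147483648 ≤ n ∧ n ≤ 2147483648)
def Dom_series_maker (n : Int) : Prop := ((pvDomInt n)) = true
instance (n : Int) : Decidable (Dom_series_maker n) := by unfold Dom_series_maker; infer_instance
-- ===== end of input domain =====

set_option maxRecDepth 4096


-- B replaces A's O(n) loop by an O(1) lookup in the sequence's 24-term cycle (objective: faster).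

-- ===== PORT A =====
-- the loop body: value = (prev % 10) + (prev // 10) + (prev_prev % 10) + (prev_prev // 10); prev, prev_prev = value, prev
def pvStepA (st : Int × Int × Int) : Int × Int × Int :=
  let (pp, p, _) := st
  let v := PySem.Int.mod p 10 + PySem.Int.floordiv p 10 +
           PySem.Int.mod pp 10 + PySem.Int.floordiv pp 10
  (p, v, v)

def series_maker (n : Int) : Int :=
  if n ≤ 0 then 0
  else if n = 1 then 1
  else
    -- state (prev_prev, prev, value), initially (0, 1, 0); for i in range(2, n+1)
    ((PySem.List.pyRange 2 (n + 1) 1).foldl (fun st _ => pvStepA st) (0, 1, 0)).2.2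

-- ===== PORT B =====
def pvCycle : List Int :=
  [2, 3, 5, 8, 13, 12, 7, 10, 8, 9, 17, 17, 16, 15, 13, 10, 5, 6, 11, 8, 10, 9, 10, 10]

def series_maker_alt (n : Int) : Int :=
  if n ≤ 0 then 0
  else if n ≤ 2 then 1
  else
    -- _CYCLE[(n - 3) % 24]; the index is always in range, .getD 0 only totalises
    ((PySem.List.pyGet? pvCycle (PySem.Int.mod (n - 3) 24)).getD 0)

-- ===== PRECONDITION & SPEC =====
def Spec_series_maker (n : Int) (out : Int) : Prop := out = series_maker_alt n
instance (n : Int) (out : Int) : Decidable (Spec_series_maker n out) := by unfold Spec_series_maker; infer_instance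

-- ===== CLAIM (what is proved, stated in full; the proofs are below) =====
def Claim_equal_series_maker : Prop := ∀ (n : Int), Dom_series_maker n → Spec_series_maker n (series_maker n)

-- ===== LEMMAS AND PROOFS =====

-- the pair recurrence underlying A's loop: (prev_prev, prev) ↦ (prev, value)
def pvG (q : Int × Int) : Int × Int :=
  (q.2, PySem.Int.mod q.2 10 + PySem.Int.floordiv q.2 10 +
        PySem.Int.mod q.1 10 + PySem.Int.floordiv q.1 10)

theorem pv_foldl_const (l : List Int) (s : Int × Int × Int) :
    l.foldl (fun st _ => pvStepA st) s = pvStepA^[l.length] s := by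
  induction l generalizing s with
  | nil => rfl
  | cons a t ih => simp [List.foldl, ih, Function.iterate_succ_apply]

theorem pv_step_iter (k : Nat) (pp p v : Int) :
    pvStepA^[k + 1] (pp, p, v) =
      ((pvG^[k + 1] (pp, p)).1, (pvG^[k + 1] (pp, p)).2, (pvG^[k + 1] (pp, p)).2) := by
  induction k generalizing pp p v with
  | zero => rfl
  | succ k ih =>
    rw [Function.iterate_succ_apply (f := pvStepA),
        Function.iterate_succ_apply (f := pvG) (n := k + 1)]
    exact ih _ _ _

theorem pv_period (k : Nat) : pvG^[k + 27] (0, 1) = pvG^[k + 3] (0, 1) := by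
  have h27 : pvG^[27] ((0 : Int), (1 : Int)) = pvG^[3] (0, 1) := by decide
  rw [Function.iterate_add_apply pvG k 27, Function.iterate_add_apply pvG k 3, h27]

theorem pv_cycle_val (j : Nat) : (pvG^[j + 2] (0, 1)).2 = pvCycle.getD (j % 24) 0 := by
  induction j using Nat.strong_induction_on with
  | _ j ih =>
    by_cases h : j < 25
    · interval_cases j <;> decide
    · have hj : j + 2 = (j - 25) + 27 := by omega
      have hm : (j - 24) % 24 = j % 24 := by omega
      have h2 : (j - 25) + 3 = (j - 24) + 2 := by omega
      rw [hj, pv_period, h2, ih (j - 24) (by omega), hm]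

-- ===== VERDICT (by name: the statement is the Claim_ definition above) =====
theorem series_maker_spec : Claim_equal_series_maker := by
  intro n _
  unfold Spec_series_maker series_maker series_maker_alt
  by_cases h0 : n ≤ 0
  · simp [h0]
  · by_cases h1 : n = 1
    · simp [h1]
    · rw [if_neg h0, if_neg h1, if_neg h0,
          pv_foldl_const, PySem.List.length_pyRange_one]
      have h2 : 2 ≤ n := by omega
      by_cases hn2 : n ≤ 2
      · have : n = 2 := by omega
        subst this; decide
      · -- n ≥ 3; write n - 3 as a natural number j
        rw [if_neg hn2]
        obtain ⟨j, hj⟩ : ∃ j : Nat, n - 3 = (j : Int) :=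
          ⟨(n - 3).toNat, by omega⟩
        have hlen : (n + 1 - 2).toNat = (j + 1) + 1 := by omega
        rw [hlen, pv_step_iter, pv_cycle_val j,
            PySem.Int.mod_eq_emod_of_pos (by norm_num), hj]
        have : ((j : Int)) % 24 = ((j % 24 : Nat) : Int) := by
          push_cast; rfl
        rw [this, PySem.List.pyGet?_natCast]
        have hlt : j % 24 < pvCycle.length := by
          have := Nat.mod_lt j (by norm_num : 0 < 24); simpa [pvCycle] using this
        simp [List.getD, List.getElem?_eq_getElem hlt]
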